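-- pv_equiv track=rewrite | github.com/roaclark/advent-of-code-2023 | src/day05/solution_1.py | pass_through_mapping
-- ===== SOURCE A (Python) =====
-- def pass_through_mapping(src, mapping):
--   mapping = sorted(mapping, key=lambda x: x['src_start'])
--   map_i = -1
--   while map_i < len(mapping) - 1 and mapping[map_i + 1]['src_start'] <= src:
--     map_i += 1
--   if map_i == -1:
--     return src
--   mapping_range = mapping[map_i]
--   if src < mapping_range['src_start'] + mapping_range['length']:
--     return src - mapping_range['src_start'] + mapping_range['dest_start']
--   return src
-- ===== SOURCE B (Python) =====
-- def pass_through_mapping(src, mapping):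
--   best = None
--   for m in mapping:
--     if m['src_start'] <= src and (best is None or m['src_start'] >= best['src_start']):
--       best = m
--   if best is None:
--     return src
--   if src < best['src_start'] + best['length']:
--     return src - best['src_start'] + best['dest_start']
--   return src
-- ===== Notes on version B (the rewrite author's own statement) =====
-- stated objective: faster
-- what changed: B drops the sort and the index walk entirely and makes a single O(n) pass keeping the best (largest src_start <= src, ties to the later entry) mapping entry, then applies only that one range.
import Mathlib
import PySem

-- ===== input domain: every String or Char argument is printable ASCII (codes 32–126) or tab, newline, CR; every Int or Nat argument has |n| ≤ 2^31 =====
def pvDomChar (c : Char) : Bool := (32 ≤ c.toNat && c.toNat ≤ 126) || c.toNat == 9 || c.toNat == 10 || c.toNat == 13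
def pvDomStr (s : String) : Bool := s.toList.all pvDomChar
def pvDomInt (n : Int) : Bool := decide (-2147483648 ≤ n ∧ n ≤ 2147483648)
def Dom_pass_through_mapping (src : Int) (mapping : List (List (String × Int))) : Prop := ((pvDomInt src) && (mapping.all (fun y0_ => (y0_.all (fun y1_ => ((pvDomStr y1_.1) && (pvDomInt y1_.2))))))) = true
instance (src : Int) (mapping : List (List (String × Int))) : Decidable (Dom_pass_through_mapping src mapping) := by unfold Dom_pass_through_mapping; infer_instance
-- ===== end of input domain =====

-- B replaces A's sort-then-walk (O(n log n)) by a single O(n) pass keeping the best qualifying entry.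

-- ===== PORT A =====
-- dict lookup m['k']; total form with default 0 — exact under Pre_ (all three keys present, no duplicates)
def ptmGet (m : List (String × Int)) (k : String) : Int :=
  ((PySem.Dict.mk m).get? k).getD 0

-- the while loop: j = map_i + 1; advances while j < len and sorted[j]['src_start'] <= src
def ptmWalk (src : Int) (l : List (List (String × Int))) (j : Nat) : Nat :=
  if h : j < l.length then
    if ptmGet l[j] "src_start" ≤ src then ptmWalk src l (j + 1) else j
  else j
termination_by l.length - j

def pass_through_mapping (src : Int) (mapping : List (List (String × Int))) : Int :=
  let m := PySem.List.sorted mapping (fun x => ptmGet x "src_start") false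
  let j := ptmWalk src m 0
  if j = 0 then src
  else
    let mapping_range := m.getD (j - 1) []
    if src < ptmGet mapping_range "src_start" + ptmGet mapping_range "length" then
      src - ptmGet mapping_range "src_start" + ptmGet mapping_range "dest_start"
    else src

-- ===== PORT B =====
def pass_through_mapping_alt (src : Int) (mapping : List (List (String × Int))) : Int :=
  let best := mapping.foldl
    (fun (b : Option (List (String × Int))) m =>
      match b with
      | none => if ptmGet m "src_start" ≤ src then some m else none
      | some bb =>
          if ptmGet m "src_start" ≤ src ∧ ptmGet bb "src_start" ≤ ptmGet m "src_start" then some m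
          else some bb)
    none
  match best with
  | none => src
  | some bb =>
      if src < ptmGet bb "src_start" + ptmGet bb "length" then
        src - ptmGet bb "src_start" + ptmGet bb "dest_start"
      else src

-- ===== PRECONDITION & SPEC =====
-- the 'src_start' value of an entry (0 if absent; used by Pre_ only to locate the chosen entry)
def ptmSrcKey (m : List (String × Int)) : Int := ((PySem.Dict.mk m).get? "src_start").getD 0

-- Pre_ is exactly A's return domain: every entry must carry 'src_start' (sorted()'s key raises
-- KeyError otherwise) and the chosen entry — the last one whose src_start is maximal among those
-- ≤ src — must carry 'length' and, when src falls inside its range, 'dest_start'; association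
-- lists with duplicate keys (not producible by any Python dict) are excluded as well.
def Pre_pass_through_mapping (src : Int) (mapping : List (List (String × Int))) : Prop :=
  (∀ m ∈ mapping, (m.map (·.1)).Nodup ∧ "src_start" ∈ m.map (·.1)) ∧
  (∀ p ∈ mapping.zipIdx,
    (ptmSrcKey p.1 ≤ src ∧
     (∀ m' ∈ mapping, ptmSrcKey m' ≤ src → ptmSrcKey m' ≤ ptmSrcKey p.1) ∧
     (∀ m' ∈ mapping.drop (p.2 + 1), ptmSrcKey m' ≤ src → ptmSrcKey m' < ptmSrcKey p.1)) →
    ("length" ∈ p.1.map (·.1) ∧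
     (src < ptmSrcKey p.1 + ((PySem.Dict.mk p.1).get? "length").getD 0 →
       "dest_start" ∈ p.1.map (·.1))))
instance (src : Int) (mapping : List (List (String × Int))) : Decidable (Pre_pass_through_mapping src mapping) := by unfold Pre_pass_through_mapping; infer_instance

def pvWitness_pass_through_mapping : Int × (List (List (String × Int))) :=
  (7, [[("src_start", 5), ("dest_start", 20), ("length", 4)],
       [("src_start", 0), ("dest_start", 100), ("length", 3)]])

def Spec_pass_through_mapping (src : Int) (mapping : List (List (String × Int))) (out : Int) : Prop := out = pass_through_mapping_alt src mapping
instance (src : Int) (mapping : List (List (String × Int))) (out : Int) : Decidable (Spec_pass_through_mapping src mapping out) := by unfold Spec_pass_through_mapping; infer_instance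

-- ===== CLAIM (what is proved, stated in full; the proofs are below) =====
def Claim_equal_pass_through_mapping : Prop := ∀ (src : Int) (mapping : List (List (String × Int))), Dom_pass_through_mapping src mapping → Pre_pass_through_mapping src mapping → Spec_pass_through_mapping src mapping (pass_through_mapping src mapping)

-- ===== LEMMAS AND PROOFS =====

-- B's loop step, named for the proofs
def ptmStep (src : Int) (b : Option (List (String × Int))) (m : List (String × Int)) :
    Option (List (String × Int)) :=
  match b with
  | none => if ptmGet m "src_start" ≤ src then some m else none
  | some bb =>
      if ptmGet m "src_start" ≤ src ∧ ptmGet bb "src_start" ≤ ptmGet m "src_start" then some m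
      else some bb

-- the entry A ends up using, phrased on the sorted list
def ptmChosen (src : Int) (l : List (List (String × Int))) :
    Option (List (String × Int)) :=
  (l.takeWhile (fun m => decide (ptmGet m "src_start" ≤ src))).getLast?

theorem ptmWalk_eq_takeWhile (src : Int) (l : List (List (String × Int))) (j : Nat) :
    ptmWalk src l j = j + ((l.drop j).takeWhile (fun m => decide (ptmGet m "src_start" ≤ src))).length := by
  unfold ptmWalk
  by_cases h : j < l.length
  · rw [dif_pos h]
    rw [List.drop_eq_getElem_cons h]
    by_cases hq : ptmGet l[j] "src_start" ≤ src
    · rw [if_pos hq, ptmWalk_eq_takeWhile src l (j + 1),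
        List.takeWhile_cons_of_pos (by simpa using hq), List.length_cons]
      omega
    · rw [if_neg hq, List.takeWhile_cons_of_neg (by simpa using hq)]
      simp
  · rw [dif_neg h, List.drop_eq_nil_of_le (by omega)]
    simp
termination_by l.length - j

-- key inequality for elements of a takeWhile prefix of a tail, under sortedness
theorem ptmKey_le_of_mem_takeWhile {y b : List (String × Int)} {ys : List (List (String × Int))}
    (hp : List.Pairwise (fun a b => ptmGet a "src_start" ≤ ptmGet b "src_start") (y :: ys))
    (hb : b ∈ ys.takeWhile (fun m => decide (ptmGet m "src_start" ≤ src)) ) :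
    ptmGet y "src_start" ≤ ptmGet b "src_start" := by
  have hmem : b ∈ ys := (List.takeWhile_prefix _).subset hb
  exact (List.pairwise_cons.mp hp).1 b hmem

-- inserting x into a key-sorted list and taking the qualifying prefix's last element
-- is exactly B's step applied to the previous chosen entry
theorem ptmChosen_insertBy (src : Int) (x : List (String × Int))
    (S : List (List (String × Int)))
    (hp : List.Pairwise (fun a b => ptmGet a "src_start" ≤ ptmGet b "src_start") S) :
    ptmChosen src (PySem.List.insertBy
        (fun a b => decide (ptmGet a "src_start" < ptmGet b "src_start")) x S)
      = ptmStep src (ptmChosen src S) x := by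
  induction S with
  | nil =>
      by_cases hq : ptmGet x "src_start" ≤ src <;>
        simp [PySem.List.insertBy, ptmChosen, ptmStep, List.takeWhile, hq]
  | cons y ys ih =>
      have hptail := (List.pairwise_cons.mp hp).2
      by_cases hlt : ptmGet x "src_start" < ptmGet y "src_start"
      · -- inserted in front: x :: y :: ys
        rw [show PySem.List.insertBy
              (fun a b => decide (ptmGet a "src_start" < ptmGet b "src_start")) x (y :: ys)
            = x :: y :: ys by simp [PySem.List.insertBy, hlt]]
        by_cases hqx : ptmGet x "src_start" ≤ src
        · by_cases hqy : ptmGet y "src_start" ≤ src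
          · -- the old prefix is nonempty and its last entry has key ≥ key y > key x
            unfold ptmChosen ptmStep
            rw [List.takeWhile_cons_of_pos (by simpa using hqx)]
            rw [List.takeWhile_cons_of_pos (by simpa using hqy)]
            cases hA : (ys.takeWhile (fun m => decide (ptmGet m "src_start" ≤ src))).getLast? with
            | none =>
                have hnil : ys.takeWhile (fun m => decide (ptmGet m "src_start" ≤ src)) = [] :=
                  List.getLast?_eq_none_iff.mp hA
                rw [hnil]
                have : ¬ (ptmGet x "src_start" ≤ src ∧
                    ptmGet y "src_start" ≤ ptmGet x "src_start") := by
                  rintro ⟨-, h2⟩; omega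
                simp [this]
            | some a =>
                have hmem : a ∈ ys.takeWhile (fun m => decide (ptmGet m "src_start" ≤ src)) :=
                  List.mem_of_getLast? hA
                have hay : ptmGet y "src_start" ≤ ptmGet a "src_start" :=
                  ptmKey_le_of_mem_takeWhile (src := src) hp hmem
                have hne : ys.takeWhile (fun m => decide (ptmGet m "src_start" ≤ src)) ≠ [] := by
                  intro h; rw [h] at hA; simp at hA
                have : ¬ (ptmGet x "src_start" ≤ src ∧
                    ptmGet a "src_start" ≤ ptmGet x "src_start") := by
                  rintro ⟨-, h2⟩; omega
                simp [List.getLast?_cons, hA, this]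
          · -- y (hence the whole old list's prefix) fails the test; x alone qualifies
            unfold ptmChosen ptmStep
            rw [List.takeWhile_cons_of_pos (by simpa using hqx)]
            rw [List.takeWhile_cons_of_neg (by simpa using hqy)]
            simp [hqx]
        · -- x fails the test and key y > key x > src, so nothing qualifies
          have hqy : ¬ ptmGet y "src_start" ≤ src := by omega
          unfold ptmChosen ptmStep
          rw [List.takeWhile_cons_of_neg (by simpa using hqx)]
          rw [List.takeWhile_cons_of_neg (by simpa using hqy)]
          simp [hqx]
      · -- key y ≤ key x: x is inserted further right, y :: insertBy x ys
        rw [show PySem.List.insertBy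
              (fun a b => decide (ptmGet a "src_start" < ptmGet b "src_start")) x (y :: ys)
            = y :: PySem.List.insertBy
                (fun a b => decide (ptmGet a "src_start" < ptmGet b "src_start")) x ys by
          simp [PySem.List.insertBy, hlt]]
        by_cases hqy : ptmGet y "src_start" ≤ src
        · have ih' := ih hptail
          unfold ptmChosen at ih'
          unfold ptmChosen ptmStep
          rw [List.takeWhile_cons_of_pos (by simpa using hqy)]
          rw [List.takeWhile_cons_of_pos (by simpa using hqy)]
          simp only [List.getLast?_cons]
          cases hA : (ys.takeWhile (fun m => decide (ptmGet m "src_start" ≤ src))).getLast? with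
          | none =>
              rw [hA] at ih'
              by_cases hqx : ptmGet x "src_start" ≤ src
              · simp only [ptmStep, hqx, if_pos] at ih'
                rw [ih']
                have hyx : ptmGet y "src_start" ≤ ptmGet x "src_start" := by omega
                simp [hqx, hyx]
              · simp only [ptmStep, hqx, if_false] at ih'
                rw [ih']
                simp [hqx]
          | some a =>
              rw [hA] at ih'
              simp only [ptmStep] at ih'
              rw [ih']
              by_cases hc : ptmGet x "src_start" ≤ src ∧
                  ptmGet a "src_start" ≤ ptmGet x "src_start"
              · simp [hc]
              · simp [hc]
        · -- y fails the test, and key x ≥ key y > src, so both prefixes are empty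
          have hqx : ¬ ptmGet x "src_start" ≤ src := by omega
          unfold ptmChosen ptmStep
          rw [List.takeWhile_cons_of_neg (by simpa using hqy)]
          rw [List.takeWhile_cons_of_neg (by simpa using hqy)]
          simp [hqx]

-- B's fold equals the chosen entry of the sorted list
theorem ptmFold_eq_chosen (src : Int) (l : List (List (String × Int))) :
    l.foldl (ptmStep src) none
      = ptmChosen src (PySem.List.sorted l (fun x => ptmGet x "src_start") false) := by
  induction l using List.reverseRecOn with
  | nil => simp [ptmChosen, PySem.List.sorted]
  | append_singleton t x ih =>
      rw [List.foldl_append]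
      rw [PySem.List.sorted_eq_foldl_insertBy, List.foldl_append]
      simp only [List.foldl_cons, List.foldl_nil]
      rw [← PySem.List.sorted_eq_foldl_insertBy]
      rw [ptmChosen_insertBy src x _ (PySem.List.sorted_pairwise t (fun x => ptmGet x "src_start"))]
      rw [ih]

-- A's walk produces exactly the chosen entry
theorem ptmWalk_chosen (src : Int) (S : List (List (String × Int))) :
    (let j := ptmWalk src S 0;
     if j = 0 then (none : Option (List (String × Int))) else some (S.getD (j-1) []))
      = ptmChosen src S := by
  have hw := ptmWalk_eq_takeWhile src S 0
  simp only [List.drop_zero, Nat.zero_add] at hw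
  set L := S.takeWhile (fun m => decide (ptmGet m "src_start" ≤ src)) with hL
  simp only [hw, ptmChosen, ← hL]
  by_cases h0 : L.length = 0
  · have : L = [] := List.eq_nil_of_length_eq_zero h0
    simp [this]
  · rw [if_neg h0]
    have hpfx : L <+: S := S.takeWhile_prefix _
    have hlen : L.length ≤ S.length := hpfx.length_le
    have hlt : L.length - 1 < L.length := by omega
    have hgd : S.getD (L.length - 1) [] = S[L.length - 1]'(by omega) :=
      S.getD_eq_getElem [] (by omega)
    have hpe : L[L.length - 1]'hlt = S[L.length - 1]'(by omega) := hpfx.getElem hlt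
    rw [hgd, ← hpe, List.getLast?_eq_getElem?, List.getElem?_eq_getElem hlt]

-- ===== VERDICT (by name: the statement is the Claim_ definition above) =====
theorem pass_through_mapping_spec : Claim_equal_pass_through_mapping := by
  intro src mapping _ _
  unfold Spec_pass_through_mapping pass_through_mapping pass_through_mapping_alt
  have hfold : mapping.foldl
      (fun (b : Option (List (String × Int))) m =>
        match b with
        | none => if ptmGet m "src_start" ≤ src then some m else none
        | some bb =>
            if ptmGet m "src_start" ≤ src ∧ ptmGet bb "src_start" ≤ ptmGet m "src_start" then some m
            else some bb)
      none = mapping.foldl (ptmStep src) none := rfl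
  rw [hfold, ptmFold_eq_chosen src mapping]
  generalize PySem.List.sorted mapping (fun x => ptmGet x "src_start") false = S
  rw [← ptmWalk_chosen src S]
  by_cases h0 : ptmWalk src S 0 = 0 <;> simp [h0]
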